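-- pv_equiv track=rewrite | github.com/AnonymousCSResearcher/MathdocClassEntityExplainability | ConceptClassSpaces/evaluate_MathEL_zbmath_keywords.py | get_binary_classification
-- ===== SOURCE A (Python) =====
-- def get_binary_classification(scores,benchmark):
--     results = {'tp': 0, 'fp': 0, 'fn': 0, 'tn': 0}
--     for line_number in range(len(scores)):
--
--         def normalize_score(score):
--             try:
--                 score = int((int(score) > 0))
--             except:
--                 if score == 'NaN':
--                     score = 0
--             return score
--
--         score_value = normalize_score(scores[line_number])
--         benchmark_value = normalize_score(benchmark[line_number])
--
--         if score_value == benchmark_value: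
--             if score_value == 1:
--                 results['tp'] += 1
--             elif score_value == 0:
--                 results['tn'] += 1
--         elif score_value != benchmark_value:
--             if score_value == 1:
--                 results['fp'] += 1
--             elif score_value == 0:
--                 results['fn'] += 1
--
--     return {'tp': results['tp'],'fp': results['fp'],'fn': results['fn'],'tn': results['tn']}
-- ===== SOURCE B (Python) =====
-- def _norm(score):
--     try:
--         return int(int(score) > 0)
--     except Exception:
--         return 0 if score == 'NaN' else score
--
--
-- def get_binary_classification(scores, benchmark):
--     pairs = [(_norm(s), _norm(b)) for s, b in zip(scores, benchmark)]
--     n1 = sum(1 for s, _ in pairs if s == 1)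
--     n0 = sum(1 for s, _ in pairs if s == 0)
--     tp = sum(1 for s, b in pairs if s == 1 and b == 1)
--     tn = sum(1 for s, b in pairs if s == 0 and b == 0)
--     return {'tp': tp, 'fp': n1 - tp, 'fn': n0 - tn, 'tn': tn}
-- ===== Notes on version B (the rewrite author's own statement) =====
-- stated objective: alternative
-- what changed: Instead of classifying each pair into one of four buckets with nested branches, B counts only two marginals (normalized score == 1, == 0) and two joint agreements (tp, tn) with independent filtered sums, and derives fp and fn arithmetically by subtraction (fp = n1 - tp, fn = n0 - tn); the fp/fn buckets are never classified.
import Mathlib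
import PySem

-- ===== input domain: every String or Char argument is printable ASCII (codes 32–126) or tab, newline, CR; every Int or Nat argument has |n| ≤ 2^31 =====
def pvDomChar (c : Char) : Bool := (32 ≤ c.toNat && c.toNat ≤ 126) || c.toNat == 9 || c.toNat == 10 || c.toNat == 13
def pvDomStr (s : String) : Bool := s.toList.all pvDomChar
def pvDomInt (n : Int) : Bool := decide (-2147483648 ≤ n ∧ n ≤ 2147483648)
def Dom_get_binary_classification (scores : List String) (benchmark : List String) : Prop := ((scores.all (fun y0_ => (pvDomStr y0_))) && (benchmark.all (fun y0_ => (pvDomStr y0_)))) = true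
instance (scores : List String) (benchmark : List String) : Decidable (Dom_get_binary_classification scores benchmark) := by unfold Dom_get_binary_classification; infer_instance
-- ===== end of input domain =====

-- B counts only the marginals (s==1, s==0) and the agreements (tp, tn) and derives
-- fp = n1 - tp and fn = n0 - tn by subtraction — objective: alternative.
-- A's fixed-key dict 'results' is rendered as a 4-tuple of counters; the returned
-- dict is the assoc list [("tp",…),("fp",…),("fn",…),("tn",…)] in A's insertion order.

-- ===== PORT A =====
-- normalize_score: int(int(score) > 0) in a try; on failure, 'NaN' -> 0, else the
-- string itself falls through.  Result is an int (inl) or the original string (inr).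
def pvNormA (score : String) : Sum Int String :=
  match PySem.Int.ofStr? score with
  | some n => Sum.inl (if 0 < n then 1 else 0)
  | none => if score = "NaN" then Sum.inl 0 else Sum.inr score

-- one iteration of A's loop body on the counter state (tp, fp, fn, tn)
def pvStepA (sv bv : Sum Int String) (r : Int × Int × Int × Int) : Int × Int × Int × Int :=
  if sv = bv then
    (if sv = Sum.inl 1 then (r.1 + 1, r.2.1, r.2.2.1, r.2.2.2)
     else if sv = Sum.inl 0 then (r.1, r.2.1, r.2.2.1, r.2.2.2 + 1)
     else r)
  else
    (if sv = Sum.inl 1 then (r.1, r.2.1 + 1, r.2.2.1, r.2.2.2)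
     else if sv = Sum.inl 0 then (r.1, r.2.1, r.2.2.1 + 1, r.2.2.2)
     else r)

def get_binary_classification (scores : List String) (benchmark : List String) : List (String × Int) :=
  let r :=
    (PySem.List.pyRange 0 scores.length 1).foldl
      (fun r i =>
        match PySem.List.pyGet? scores i, PySem.List.pyGet? benchmark i with
        | some s, some b => pvStepA (pvNormA s) (pvNormA b) r
        | _, _ => r)  -- IndexError in Python: excluded by Pre_
      (0, 0, 0, 0)
  [("tp", r.1), ("fp", r.2.1), ("fn", r.2.2.1), ("tn", r.2.2.2)]

-- ===== PORT B =====
def pvNormB (score : String) : Sum Int String :=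
  match PySem.Int.ofStr? score with
  | some n => Sum.inl (if 0 < n then 1 else 0)
  | none => if score = "NaN" then Sum.inl 0 else Sum.inr score

def get_binary_classification_alt (scores : List String) (benchmark : List String) : List (String × Int) :=
  let pairs := (scores.zip benchmark).map (fun p => (pvNormB p.1, pvNormB p.2))
  let n1 : Int := pairs.countP (fun p => decide (p.1 = Sum.inl 1))
  let n0 : Int := pairs.countP (fun p => decide (p.1 = Sum.inl 0))
  let tp : Int := pairs.countP (fun p => decide (p.1 = Sum.inl 1 ∧ p.2 = Sum.inl 1))
  let tn : Int := pairs.countP (fun p => decide (p.1 = Sum.inl 0 ∧ p.2 = Sum.inl 0))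
  [("tp", tp), ("fp", n1 - tp), ("fn", n0 - tn), ("tn", tn)]

-- ===== PRECONDITION & SPEC =====
-- A indexes benchmark[line_number] for every line_number < len(scores): it raises
-- IndexError exactly when benchmark is shorter than scores; those inputs are excluded.
def Pre_get_binary_classification (scores : List String) (benchmark : List String) : Prop :=
  scores.length ≤ benchmark.length
instance (scores : List String) (benchmark : List String) : Decidable (Pre_get_binary_classification scores benchmark) := by unfold Pre_get_binary_classification; infer_instance

def pvWitness_get_binary_classification : List String × List String :=
  (["1", "0", "NaN", "x"], ["2", "1", "0", "x"])

def Spec_get_binary_classification (scores : List String) (benchmark : List String) (out : List (String × Int)) : Prop := out = get_binary_classification_alt scores benchmark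
instance (scores : List String) (benchmark : List String) (out : List (String × Int)) : Decidable (Spec_get_binary_classification scores benchmark out) := by unfold Spec_get_binary_classification; infer_instance

-- ===== CLAIM (what is proved, stated in full; the proofs are below) =====
def Claim_equal_get_binary_classification : Prop := ∀ (scores : List String) (benchmark : List String), Dom_get_binary_classification scores benchmark → Pre_get_binary_classification scores benchmark → Spec_get_binary_classification scores benchmark (get_binary_classification scores benchmark)

-- ===== LEMMAS AND PROOFS =====

-- A's fold over the pairs accumulates exactly the four joint counts
-- (tp-count, s=1∧b≠1, s=0∧b≠0, tn-count) onto the initial counters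
theorem foldA_countP (l : List (Sum Int String × Sum Int String)) (a b c d : Int) :
    l.foldl (fun r p => pvStepA p.1 p.2 r) (a, b, c, d) =
      (a + (l.countP (fun p => decide (p.1 = Sum.inl 1 ∧ p.2 = Sum.inl 1)) : Int),
       b + (l.countP (fun p => decide (p.1 = Sum.inl 1 ∧ ¬ p.2 = Sum.inl 1)) : Int),
       c + (l.countP (fun p => decide (p.1 = Sum.inl 0 ∧ ¬ p.2 = Sum.inl 0)) : Int),
       d + (l.countP (fun p => decide (p.1 = Sum.inl 0 ∧ p.2 = Sum.inl 0)) : Int)) := by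
  induction l generalizing a b c d with
  | nil => simp
  | cons x xs ih =>
    simp only [List.foldl_cons, List.countP_cons]
    rw [show pvStepA x.1 x.2 (a, b, c, d) =
      (a + (if x.1 = Sum.inl 1 ∧ x.2 = Sum.inl 1 then 1 else 0),
       b + (if x.1 = Sum.inl 1 ∧ ¬ x.2 = Sum.inl 1 then 1 else 0),
       c + (if x.1 = Sum.inl 0 ∧ ¬ x.2 = Sum.inl 0 then 1 else 0),
       d + (if x.1 = Sum.inl 0 ∧ x.2 = Sum.inl 0 then 1 else 0)) from by
        unfold pvStepA; split_ifs <;> simp_all]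
    rw [ih]
    simp only [decide_eq_true_eq, Prod.mk.injEq]
    refine ⟨?_, ?_, ?_, ?_⟩ <;> split_ifs <;> push_cast <;> omega

-- a marginal count splits into agreeing + disagreeing joint counts
theorem countP_split (l : List (Sum Int String × Sum Int String)) (v : Int) :
    l.countP (fun p => decide (p.1 = Sum.inl v)) =
      l.countP (fun p => decide (p.1 = Sum.inl v ∧ p.2 = Sum.inl v)) +
      l.countP (fun p => decide (p.1 = Sum.inl v ∧ ¬ p.2 = Sum.inl v)) := by
  induction l with
  | nil => simp
  | cons x xs ih =>
    simp only [List.countP_cons]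
    by_cases h1 : x.1 = Sum.inl v <;> by_cases h2 : x.2 = Sum.inl v <;>
      simp_all <;> omega

-- A's index loop over range(len(scores)) equals a fold over the zipped, normalized
-- pairs, prefix by prefix
theorem loopA_eq_zip (scores benchmark : List String) (n : Nat)
    (h1 : n ≤ scores.length) (h2 : n ≤ benchmark.length) (init : Int × Int × Int × Int) :
    (PySem.List.pyRange 0 (n : Int) 1).foldl
      (fun r i =>
        match PySem.List.pyGet? scores i, PySem.List.pyGet? benchmark i with
        | some s, some b => pvStepA (pvNormA s) (pvNormA b) r
        | _, _ => r) init
    = (((scores.zip benchmark).take n).map (fun p => (pvNormA p.1, pvNormA p.2))).foldl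
        (fun r p => pvStepA p.1 p.2 r) init := by
  induction n with
  | zero => simp
  | succ m ih =>
    have hm1 : m < scores.length := by omega
    have hm2 : m < benchmark.length := by omega
    have hz : m < (scores.zip benchmark).length := by simp; omega
    have hsplit : PySem.List.pyRange 0 ((m : Int) + 1) 1 =
        PySem.List.pyRange 0 (m : Int) 1 ++ [(m : Int)] :=
      PySem.List.pyRange_one_succ_right (by positivity)
    have htake : (scores.zip benchmark).take (m + 1) =
        (scores.zip benchmark).take m ++ [(scores.zip benchmark)[m]] :=
      List.take_succ_eq_append_getElem hz
    push_cast
    rw [hsplit, htake, List.map_append, List.foldl_append, List.foldl_append,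
      ih (by omega) (by omega)]
    simp [List.getElem?_eq_getElem hm1, List.getElem?_eq_getElem hm2, List.getElem_zip]

theorem get_binary_classification_spec : Claim_equal_get_binary_classification := by
  intro scores benchmark _ hpre
  unfold Pre_get_binary_classification at hpre
  unfold Spec_get_binary_classification get_binary_classification get_binary_classification_alt
  have hnorm : pvNormB = pvNormA := rfl
  have hlen : (scores.zip benchmark).length = scores.length := by
    simp [List.length_zip]; omega
  rw [loopA_eq_zip scores benchmark scores.length le_rfl hpre,
    ← hlen, List.take_length, foldA_countP]
  simp only [hnorm, zero_add]
  have h1 := countP_split ((scores.zip benchmark).map (fun p => (pvNormA p.1, pvNormA p.2))) 1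
  have h0 := countP_split ((scores.zip benchmark).map (fun p => (pvNormA p.1, pvNormA p.2))) 0
  simp only [List.cons.injEq, Prod.mk.injEq, and_true, true_and]
  omega
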